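-- pv_equiv track=rewrite | github.com/pypi-data/pypi-mirror-379 | packages/pandas-match-recognize/pandas_match_recognize-0.1.3.tar.gz/pandas_match_recognize-0.1.3/src/matcher/automata.py | _compute_index_shifts
-- ===== SOURCE A (Python) =====
-- from typing import (
--     Callable, List, Optional, Dict, Any, Set, Tuple, Union,
--     FrozenSet, Iterator, Protocol
-- )
--
-- def _compute_index_shifts(removed_indices: List[int]) -> Dict[int, int]:
--     """Compute how much each remaining state index should be shifted down."""
--     removed_set = set(removed_indices)
--     shift_mapping = {}
--
--     shift_amount = 0
--     for i in range(max(removed_indices) + 1 if removed_indices else 0):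
--         if i in removed_set:
--             shift_amount += 1
--         else:
--             if shift_amount > 0:
--                 shift_mapping[i] = i - shift_amount
--
--     return shift_mapping
-- ===== SOURCE B (Python) =====
-- def _compute_index_shifts(removed_indices):
--     """Compute how much each remaining state index should be shifted down."""
--     r = sorted({x for x in removed_indices if x >= 0})
--     shift_mapping = {}
--     for k, (lo, hi) in enumerate(zip(r, r[1:]), start=1):
--         for i in range(lo + 1, hi):
--             shift_mapping[i] = i - k
--     return shift_mapping
-- ===== Notes on version B (the rewrite author's own statement) =====
-- stated objective: alternative
-- what changed: B sorts the distinct non-negative removed indices once and emits whole gap segments between consecutive removals with the shift equal to the segment's position, instead of scanning every integer from 0 to max with a per-element set-membership test and a running shift counter.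
import Mathlib
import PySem

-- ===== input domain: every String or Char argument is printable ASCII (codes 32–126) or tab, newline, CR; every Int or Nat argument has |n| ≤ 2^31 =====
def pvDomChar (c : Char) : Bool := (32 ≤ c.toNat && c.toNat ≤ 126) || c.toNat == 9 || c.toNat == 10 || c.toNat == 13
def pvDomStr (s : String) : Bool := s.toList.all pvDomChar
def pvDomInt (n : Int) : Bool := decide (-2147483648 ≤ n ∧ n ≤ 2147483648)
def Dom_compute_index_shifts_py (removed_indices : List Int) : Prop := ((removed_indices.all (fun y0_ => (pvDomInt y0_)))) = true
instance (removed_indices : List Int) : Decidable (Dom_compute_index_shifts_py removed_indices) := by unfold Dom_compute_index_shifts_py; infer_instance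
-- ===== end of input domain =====

-- B walks the gaps between the sorted distinct non-negative removed indices instead of
-- scanning every integer up to max with a membership test (objective: alternative decomposition).

-- ===== PORT A =====
def compute_index_shifts_py (removed_indices : List Int) : List (Int × Int) :=
  let removed_set : PySem.Set Int := PySem.Set.ofList removed_indices
  let bound : Int := match PySem.List.max? removed_indices (fun x => x) with
    | some m => m + 1
    | none => 0
  let st := (PySem.List.pyRange 0 bound 1).foldl
    (fun (st : PySem.Dict Int Int × Int) i =>
      if PySem.Set.contains removed_set i then (st.1, st.2 + 1)
      else if st.2 > 0 then (st.1.insert i (i - st.2), st.2) else st)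
    (PySem.Dict.empty, 0)
  st.1.items

-- ===== PORT B =====
def compute_index_shifts_py_alt (removed_indices : List Int) : List (Int × Int) :=
  let r : List Int :=
    PySem.List.sorted (PySem.Set.ofList (removed_indices.filter (fun x => decide (0 ≤ x)))) (fun x => x) false
  let d := (PySem.List.enumerate (r.zip (PySem.List.slice r (some 1) none)) 1).foldl
    (fun (d : PySem.Dict Int Int) p =>
      (PySem.List.pyRange (p.2.1 + 1) p.2.2 1).foldl (fun d i => d.insert i (i - p.1)) d)
    PySem.Dict.empty
  d.items

-- ===== PRECONDITION & SPEC =====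
def Spec_compute_index_shifts_py (removed_indices : List Int) (out : List (Int × Int)) : Prop := out = compute_index_shifts_py_alt removed_indices
instance (removed_indices : List Int) (out : List (Int × Int)) : Decidable (Spec_compute_index_shifts_py removed_indices out) := by unfold Spec_compute_index_shifts_py; infer_instance

-- ===== CLAIM (what is proved, stated in full; the proofs are below) =====
def Claim_equal_compute_index_shifts_py : Prop := ∀ (removed_indices : List Int), Dom_compute_index_shifts_py removed_indices → Spec_compute_index_shifts_py removed_indices (compute_index_shifts_py removed_indices)

-- ===== LEMMAS AND PROOFS =====

-- A's loop body, named for the proofs (definitionally the lambda in port A)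
def stepA (S : PySem.Set Int) (st : PySem.Dict Int Int × Int) (i : Int) : PySem.Dict Int Int × Int :=
  if PySem.Set.contains S i then (st.1, st.2 + 1)
  else if st.2 > 0 then (st.1.insert i (i - st.2), st.2) else st

-- the (index, value) pairs both programs produce for the suffix `t` of sorted removals,
-- next index `a`, current shift `k`
def gapList (k a : Int) : List Int → List (Int × Int)
  | [] => []
  | x :: t => (PySem.List.pyRange a x 1).map (fun i => (i, i - k)) ++ gapList (k + 1) (x + 1) t

-- `bndTo a r` = (last element of r) + 1 (= a for r = [])
def bndTo (a : Int) : List Int → Int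
  | [] => a
  | x :: t => bndTo (x + 1) t

theorem lt_bndTo : ∀ (t : List Int) (x : Int), List.Pairwise (· < ·) (x :: t) → x < bndTo (x + 1) t := by
  intro t
  induction t with
  | nil => intro x _; simp [bndTo]
  | cons y t' ih =>
    intro x hp
    have hxy : x < y := (List.pairwise_cons.mp hp).1 y (by simp)
    have := ih y (List.pairwise_cons.mp hp).2
    simp only [bndTo]
    omega

theorem bndTo_eq_getLast : ∀ (t : List Int) (x : Int), bndTo (x + 1) t = (x :: t).getLast (by simp) + 1 := by
  intro t
  induction t with
  | nil => intro x; simp [bndTo]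
  | cons y t' ih =>
    intro x
    simp only [bndTo]
    rw [ih y]
    simp [List.getLast]

theorem getLast_of_max : ∀ (r : List Int) (hne : r ≠ []) (m : Int), List.Pairwise (· < ·) r → m ∈ r →
    (∀ y ∈ r, y ≤ m) → r.getLast hne = m := by
  intro r
  induction r with
  | nil => simp
  | cons x t ih =>
    intro hne m hp hm hub
    rcases t with _ | ⟨y, t'⟩
    · simp at hm ⊢; exact hm.symm
    · have hmt : m ∈ y :: t' := by
        rcases List.mem_cons.mp hm with h | h
        · exfalso
          have hy : x < y := (List.pairwise_cons.mp hp).1 y (by simp)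
          have := hub y (by simp)
          omega
        · exact h
      rw [List.getLast_cons (by simp)]
      exact ih (by simp) m (List.pairwise_cons.mp hp).2 hmt (fun z hz => hub z (by simp [hz]))

theorem foldl_stepA_zero (S : PySem.Set Int) :
    ∀ (l : List Int) (d : PySem.Dict Int Int),
      (∀ i ∈ l, PySem.Set.contains S i = false) →
      l.foldl (stepA S) (d, 0) = (d, 0) := by
  intro l
  induction l with
  | nil => intro d _; rfl
  | cons i l' ih =>
    intro d h
    have hi := h i (by simp)
    simp only [List.foldl_cons, stepA, hi]
    simp only [Bool.false_eq_true, if_false, gt_iff_lt, lt_self_iff_false, if_false]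
    exact ih d (fun j hj => h j (by simp [hj]))

theorem foldl_stepA_const (S : PySem.Set Int) :
    ∀ (l : List Int) (d : PySem.Dict Int Int) (k : Int), 0 < k →
      (∀ i ∈ l, PySem.Set.contains S i = false) →
      l.foldl (stepA S) (d, k) = (l.foldl (fun d i => d.insert i (i - k)) d, k) := by
  intro l
  induction l with
  | nil => intro d k _ _; rfl
  | cons i l' ih =>
    intro d k hk h
    have hi := h i (by simp)
    simp only [List.foldl_cons, stepA, hi, Bool.false_eq_true, if_false, gt_iff_lt, hk, if_pos]
    exact ih _ k hk (fun j hj => h j (by simp [hj]))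

theorem items_insert_range (a b : Int) (d : PySem.Dict Int Int) (k : Int)
    (hfresh : ∀ p ∈ d.items, p.1 < a) :
    ((PySem.List.pyRange a b 1).foldl (fun d i => d.insert i (i - k)) d).items
      = d.items ++ (PySem.List.pyRange a b 1).map (fun i => (i, i - k)) := by
  have h1 : ∀ i ∈ PySem.List.pyRange a b 1, d.contains ((fun (i : Int) => i) i) = false := by
    intro i hi
    have hia : a ≤ i := (PySem.List.mem_pyRange_one.mp hi).1
    by_contra hc
    have : d.contains i = true := by revert hc; cases d.contains i <;> simp
    have hk := (PySem.Dict.contains_iff_mem_keys d i).mp this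
    simp only [PySem.Dict.keys, List.mem_map] at hk
    obtain ⟨p, hp, hpe⟩ := hk
    have := hfresh p hp
    omega
  have h2 : ((PySem.List.pyRange a b 1).map (fun (i : Int) => i)).Nodup := by
    simpa using PySem.List.nodup_pyRange_one (a := a) (b := b)
  have := PySem.Dict.items_foldl_insert_fresh (l := PySem.List.pyRange a b 1)
    (k := fun (i : Int) => i) (v := fun i => i - k) (d := d) h1 h2
  simpa using this

theorem lemA (S : PySem.Set Int) :
    ∀ (r : List Int) (a : Int) (d : PySem.Dict Int Int) (k : Int), 0 < k →
      List.Pairwise (· < ·) r → (∀ y ∈ r, a ≤ y) →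
      (∀ i, a ≤ i → PySem.Set.contains S i = decide (i ∈ r)) →
      (∀ p ∈ d.items, p.1 < a) →
      (PySem.List.pyRange a (bndTo a r) 1).foldl (stepA S) (d, k)
        = (PySem.Dict.mk (d.items ++ gapList k a r), k + r.length) := by
  intro r
  induction r with
  | nil =>
    intro a d k hk _ _ _ _
    rw [show bndTo a [] = a from rfl, PySem.List.pyRange_one_eq_nil le_rfl]
    simp [gapList]
  | cons x t ih =>
    intro a d k hk hp hle hmem hfresh
    have hax : a ≤ x := hle x (by simp)
    have hxb : x < bndTo (x + 1) t := lt_bndTo t x hp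
    have hsplit : PySem.List.pyRange a (bndTo a (x :: t)) 1
        = PySem.List.pyRange a x 1 ++ PySem.List.pyRange x (bndTo (x + 1) t) 1 := by
      rw [show bndTo a (x :: t) = bndTo (x + 1) t from rfl]
      exact PySem.List.pyRange_one_append a x (bndTo (x + 1) t) hax (le_of_lt hxb)
    have hcons : PySem.List.pyRange x (bndTo (x + 1) t) 1
        = x :: PySem.List.pyRange (x + 1) (bndTo (x + 1) t) 1 := PySem.List.pyRange_one_cons hxb
    -- contains is false strictly below x (for i ≥ a)
    have hfalse : ∀ i ∈ PySem.List.pyRange a x 1, PySem.Set.contains S i = false := by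
      intro i hi
      have h1 := PySem.List.mem_pyRange_one.mp hi
      rw [hmem i h1.1]
      simp only [decide_eq_false_iff_not, List.mem_cons]
      rintro (rfl | hit)
      · omega
      · have := (List.pairwise_cons.mp hp).1 i hit; omega
    rw [hsplit, List.foldl_append, foldl_stepA_const S _ d k hk hfalse, hcons, List.foldl_cons]
    have hx : PySem.Set.contains S x = true := by rw [hmem x hax]; simp
    have hitems := items_insert_range a x d k hfresh
    simp only [stepA, hx, if_pos]
    have hnext := ih (x + 1) ((PySem.List.pyRange a x 1).foldl (fun d i => d.insert i (i - k)) d) (k + 1)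
      (by omega) (List.pairwise_cons.mp hp).2
      (fun y hy => by have := (List.pairwise_cons.mp hp).1 y hy; omega)
      (fun i hi => by
        rw [hmem i (by omega)]
        have hix : i ≠ x := by omega
        simp [List.mem_cons, hix])
      (by
        intro p hp'
        rw [hitems] at hp'
        rcases List.mem_append.mp hp' with h | h
        · have := hfresh p h; omega
        · obtain ⟨i, hi, rfl⟩ := List.mem_map.mp h
          have := (PySem.List.mem_pyRange_one.mp hi).2
          simpa using by omega)
    rw [hnext, hitems]
    simp only [gapList, List.append_assoc, List.length_cons, Prod.mk.injEq]
    refine ⟨trivial, by push_cast; ring⟩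

theorem lemB :
    ∀ (t : List Int) (x k : Int) (d : PySem.Dict Int Int),
      List.Pairwise (· < ·) (x :: t) → (∀ p ∈ d.items, p.1 < x + 1) →
      ((PySem.List.enumerate ((x :: t).zip t) k).foldl
        (fun (d : PySem.Dict Int Int) p =>
          (PySem.List.pyRange (p.2.1 + 1) p.2.2 1).foldl (fun d i => d.insert i (i - p.1)) d) d).items
        = d.items ++ gapList k (x + 1) t := by
  intro t
  induction t with
  | nil => intro x k d _ _; simp [gapList]
  | cons y t' ih =>
    intro x k d hp hfresh
    have hxy : x < y := (List.pairwise_cons.mp hp).1 y (by simp)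
    rw [show (x :: y :: t').zip (y :: t') = (x, y) :: (y :: t').zip t' from rfl,
        PySem.List.enumerate_cons, List.foldl_cons]
    have hitems := items_insert_range (x + 1) y d k hfresh
    rw [ih y (k + 1) _ (List.pairwise_cons.mp hp).2 (by
      intro p hp'
      rw [hitems] at hp'
      rcases List.mem_append.mp hp' with h | h
      · have := hfresh p h; omega
      · obtain ⟨i, hi, rfl⟩ := List.mem_map.mp h
        have := (PySem.List.mem_pyRange_one.mp hi).2
        simpa using by omega)]
    rw [hitems]
    simp [gapList]

theorem ports_agree (removed : List Int) :
    compute_index_shifts_py removed = compute_index_shifts_py_alt removed := by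
  unfold compute_index_shifts_py compute_index_shifts_py_alt
  simp only []
  rcases hmax : PySem.List.max? removed (fun x => x) with _ | m
  · have hnil : removed = [] := (PySem.List.max?_eq_none_iff removed (fun x => x)).mp hmax
    subst hnil
    rfl
  · have hmem_removed : m ∈ removed := PySem.List.max?_mem hmax
    have hub0 : ∀ y ∈ removed, y ≤ m := PySem.List.max?_isMax hmax
    by_cases hm0 : 0 ≤ m
    · -- main case
      have hpair : (PySem.List.sorted (PySem.Set.ofList (removed.filter (fun x => decide (0 ≤ x)))) (fun x => x) false).Pairwise (· < ·) :=
        PySem.List.sorted_ofList_pairwise_lt (removed.filter (fun x => decide (0 ≤ x)))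
      have hmemr : ∀ i : Int, i ∈ PySem.List.sorted (PySem.Set.ofList (removed.filter (fun x => decide (0 ≤ x)))) (fun x => x) false ↔ (i ∈ removed ∧ 0 ≤ i) := by
        intro i
        rw [PySem.List.mem_sorted, PySem.Set.mem_ofList, List.mem_filter]
        simp
      rcases hr : PySem.List.sorted (PySem.Set.ofList (removed.filter (fun x => decide (0 ≤ x)))) (fun x => x) false with _ | ⟨x, t⟩
      · exfalso
        have : m ∈ ([] : List Int) := by rw [← hr, hmemr]; exact ⟨hmem_removed, hm0⟩
        simp at this
      · rw [hr] at hpair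
        have hmemr' : ∀ i : Int, i ∈ x :: t ↔ (i ∈ removed ∧ 0 ≤ i) := by
          intro i; rw [← hr]; exact hmemr i
        have hub : ∀ y ∈ x :: t, y ≤ m := fun y hy => hub0 y ((hmemr' y).mp hy).1
        have hmr : m ∈ x :: t := (hmemr' m).mpr ⟨hmem_removed, hm0⟩
        have hlast : (x :: t).getLast (by simp) = m := getLast_of_max _ (by simp) m hpair hmr hub
        have hbnd : bndTo (x + 1) t = m + 1 := by rw [bndTo_eq_getLast t x, hlast]
        have hS : ∀ i : Int, 0 ≤ i → PySem.Set.contains (PySem.Set.ofList removed) i = decide (i ∈ x :: t) := by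
          intro i hi
          have hiff : PySem.Set.contains (PySem.Set.ofList removed) i = true ↔ i ∈ x :: t := by
            rw [PySem.Set.contains_iff, PySem.Set.mem_ofList, hmemr' i]
            exact ⟨fun h => ⟨h, hi⟩, fun h => h.1⟩
          by_cases hc : i ∈ x :: t
          · simp only [hc, decide_true]; exact hiff.mpr hc
          · simp only [hc, decide_false]
            cases hcc : PySem.Set.contains (PySem.Set.ofList removed) i
            · rfl
            · exact absurd (hiff.mp hcc) hc
        have hfun : (fun (st : PySem.Dict Int Int × Int) i =>
              if PySem.Set.contains (PySem.Set.ofList removed) i then (st.1, st.2 + 1)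
              else if st.2 > 0 then (st.1.insert i (i - st.2), st.2) else st)
            = stepA (PySem.Set.ofList removed) := rfl
        rw [hfun]
        have hx0 : 0 ≤ x := ((hmemr' x).mp (by simp)).2
        have hxm : x ≤ m := hub x (by simp)
        have hxb : x < bndTo (x + 1) t := lt_bndTo t x hpair
        have hsplit : PySem.List.pyRange 0 (m + 1) 1
            = PySem.List.pyRange 0 x 1 ++ PySem.List.pyRange x (m + 1) 1 :=
          PySem.List.pyRange_one_append 0 x (m + 1) hx0 (by omega)
        rw [hsplit, List.foldl_append,
            foldl_stepA_zero (PySem.Set.ofList removed) _ _ (by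
              intro i hi
              have h1 := PySem.List.mem_pyRange_one.mp hi
              rw [hS i h1.1]
              simp only [decide_eq_false_iff_not, List.mem_cons]
              rintro (rfl | hit)
              · omega
              · have := (List.pairwise_cons.mp hpair).1 i hit; omega),
            ← hbnd, PySem.List.pyRange_one_cons hxb, List.foldl_cons]
        have hxtrue : PySem.Set.contains (PySem.Set.ofList removed) x = true := by
          rw [hS x hx0]; simp
        simp only [stepA, hxtrue, if_pos, zero_add]
        rw [lemA (PySem.Set.ofList removed) t (x + 1) PySem.Dict.empty 1 (by omega)
              (List.pairwise_cons.mp hpair).2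
              (fun y hy => by have := (List.pairwise_cons.mp hpair).1 y hy; omega)
              (fun i hi => by
                rw [hS i (by omega)]
                have hix : i ≠ x := by omega
                simp [List.mem_cons, hix])
              (by simp [PySem.Dict.empty])]
        rw [PySem.List.slice_from_one]
        rw [List.tail_cons, lemB t x 1 PySem.Dict.empty hpair (by simp [PySem.Dict.empty])]
    · -- max < 0 : both empty
      have hflt : removed.filter (fun x => decide (0 ≤ x)) = [] := by
        rw [List.filter_eq_nil_iff]
        intro y hy
        have := hub0 y hy
        simp; omega
      rw [hflt]
      rw [PySem.List.pyRange_one_eq_nil (a := 0) (b := m + 1) (by omega)]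
      rfl

-- ===== VERDICT (by name: the statement is the Claim_ definition above) =====
theorem compute_index_shifts_py_spec : Claim_equal_compute_index_shifts_py := by
  intro removed_indices _
  exact ports_agree removed_indices
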